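-- pv_equiv track=rewrite | github.com/djglxxii/PacMan-V8 | pacman/tools/extract_mame_assets.py | decode_master_palette
-- ===== SOURCE A (Python) =====
-- def decode_master_palette(prom):
--     """32-byte PROM -> list of 32 (r,g,b) tuples.
--
--     Bit layout (per MAME pacman_state::pacman_palette):
--       bits 0..2 = red, bits 3..5 = green, bits 6..7 = blue
--     Resistor weights: r/g use 1k/470/220 ohm -> ~0x21,0x47,0x97;
--                       b     uses   470/220 ohm -> ~0x51,0xae.
--     """
--     rw = (0x21, 0x47, 0x97)
--     gw = (0x21, 0x47, 0x97)
--     bw = (0x51, 0xAE)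
--     pal = []
--     for b in prom:
--         r = rw[0] * ((b >> 0) & 1) + rw[1] * ((b >> 1) & 1) + rw[2] * ((b >> 2) & 1)
--         g = gw[0] * ((b >> 3) & 1) + gw[1] * ((b >> 4) & 1) + gw[2] * ((b >> 5) & 1)
--         blu = bw[0] * ((b >> 6) & 1) + bw[1] * ((b >> 7) & 1)
--         pal.append((min(r, 255), min(g, 255), min(blu, 255)))
--     return pal
-- ===== SOURCE B (Python) =====
-- # DP-built full 256-entry palette table (subset-sum doubling over the 8 weighted
-- # bits), then decoding is a single table lookup per byte.
-- _WEIGHTS = [(0x21, 0, 0), (0x47, 0, 0), (0x97, 0, 0),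
--             (0, 0x21, 0), (0, 0x47, 0), (0, 0x97, 0),
--             (0, 0, 0x51), (0, 0, 0xAE)]
-- _TABLE = [(0, 0, 0)]
-- for _dr, _dg, _db in _WEIGHTS:
--     _TABLE = _TABLE + [(r + _dr, g + _dg, b + _db) for (r, g, b) in _TABLE]
-- # per-channel sums max out at exactly 0x21+0x47+0x97 = 0x51+0xAE = 255,
-- # so no clamp is needed.
--
--
-- def decode_master_palette(prom):
--     return [_TABLE[b & 0xFF] for b in prom]
-- ===== Notes on version B (the rewrite author's own statement) =====
-- stated objective: faster
-- what changed: Instead of computing each channel by per-bit shift/mask/multiply arithmetic with a clamp, B builds the complete 256-entry palette once by a subset-sum doubling DP over the eight weighted bits (each weight doubles the table) and decodes each PROM byte with a single lookup at b & 0xFF; the clamp disappears because each channel's weights sum to exactly 255.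
import Mathlib
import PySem

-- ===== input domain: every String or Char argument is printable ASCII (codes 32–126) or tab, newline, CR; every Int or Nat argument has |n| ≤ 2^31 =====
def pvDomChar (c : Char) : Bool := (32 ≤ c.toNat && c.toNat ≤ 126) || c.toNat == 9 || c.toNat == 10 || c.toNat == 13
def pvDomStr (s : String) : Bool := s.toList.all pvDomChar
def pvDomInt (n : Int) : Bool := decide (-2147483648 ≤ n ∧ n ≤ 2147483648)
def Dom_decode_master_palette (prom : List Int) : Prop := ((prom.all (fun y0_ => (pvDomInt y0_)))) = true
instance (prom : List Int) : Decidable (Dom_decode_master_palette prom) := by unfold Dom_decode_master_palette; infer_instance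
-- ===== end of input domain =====

-- B replaces A's per-bit resistor-weight arithmetic + clamp by a 256-entry palette
-- table built once by subset-sum doubling over the eight weighted bits, then a
-- single lookup per byte (alternative algorithm, same asymptotic cost).


-- ===== PORT A =====
-- literal transliteration: constant weight tuples, per-bit arithmetic, min-cap, append loop
def decode_master_palette (prom : List Int) : List (Int × Int × Int) :=
  let rw : Int × Int × Int := (0x21, 0x47, 0x97)
  let gw : Int × Int × Int := (0x21, 0x47, 0x97)
  let bw : Int × Int := (0x51, 0xAE)
  prom.foldl (fun (pal : List (Int × Int × Int)) (b : Int) =>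
    let r := rw.1 * PySem.Int.band (b >>> (0:Nat)) 1 + rw.2.1 * PySem.Int.band (b >>> (1:Nat)) 1
               + rw.2.2 * PySem.Int.band (b >>> (2:Nat)) 1
    let g := gw.1 * PySem.Int.band (b >>> (3:Nat)) 1 + gw.2.1 * PySem.Int.band (b >>> (4:Nat)) 1
               + gw.2.2 * PySem.Int.band (b >>> (5:Nat)) 1
    let blu := bw.1 * PySem.Int.band (b >>> (6:Nat)) 1 + bw.2 * PySem.Int.band (b >>> (7:Nat)) 1
    pal ++ [(min r 255, min g 255, min blu 255)]) []

-- ===== PORT B =====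
-- module-level DP: each weighted bit doubles the table, as in Source B
def pvWEIGHTS : List (Int × Int × Int) :=
  [(0x21, 0, 0), (0x47, 0, 0), (0x97, 0, 0),
   (0, 0x21, 0), (0, 0x47, 0), (0, 0x97, 0),
   (0, 0, 0x51), (0, 0, 0xAE)]

def pvTABLE : List (Int × Int × Int) :=
  pvWEIGHTS.foldl (fun t w =>
    t ++ t.map (fun p => (p.1 + w.1, p.2.1 + w.2.1, p.2.2 + w.2.2))) [(0, 0, 0)]

def decode_master_palette_alt (prom : List Int) : List (Int × Int × Int) :=
  prom.map (fun b => PySem.List.pyGetD pvTABLE (PySem.Int.band b 255) (0, 0, 0))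

-- ===== PRECONDITION & SPEC =====
def Spec_decode_master_palette (prom : List Int) (out : List (Int × Int × Int)) : Prop := out = decode_master_palette_alt prom
instance (prom : List Int) (out : List (Int × Int × Int)) : Decidable (Spec_decode_master_palette prom out) := by unfold Spec_decode_master_palette; infer_instance

-- ===== CLAIM =====
def Claim_equal_decode_master_palette : Prop := ∀ (prom : List Int), Dom_decode_master_palette prom → Spec_decode_master_palette prom (decode_master_palette prom)

-- ===== LEMMAS AND PROOFS =====

-- Python b & 255 is the floor remainder b % 256, also for negative b (ditto for mask 1).
theorem pv_band255 (b : Int) : PySem.Int.band b 255 = b % 256 := by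
  by_cases hb : 0 ≤ b
  · unfold PySem.Int.band
    rw [if_pos hb, if_pos (by norm_num : (0:Int) ≤ 255)]
    have h := Nat.and_two_pow_sub_one_eq_mod b.toNat 8
    norm_num at h
    rw [show (255:Int).toNat = 255 from rfl, h]
    omega
  · unfold PySem.Int.band
    rw [if_neg (by omega), if_pos (by norm_num : (0:Int) ≤ 255)]
    rw [show (255:Int).toNat = 255 from rfl]
    have h := Nat.and_two_pow_sub_one_eq_mod (-b - 1).toNat 8
    norm_num at h
    rw [show (-b - 1).toNat = (-b).toNat - 1 from by omega, Nat.and_comm, h]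
    omega

theorem pv_band1 (b : Int) : PySem.Int.band b 1 = b % 2 := by
  by_cases hb : 0 ≤ b
  · unfold PySem.Int.band
    rw [if_pos hb, if_pos (by norm_num : (0:Int) ≤ 1)]
    rw [show (1:Int).toNat = 1 from rfl, Nat.and_one_is_mod b.toNat]
    omega
  · unfold PySem.Int.band
    rw [if_neg (by omega), if_pos (by norm_num : (0:Int) ≤ 1)]
    rw [show (1:Int).toNat = 1 from rfl, Nat.and_comm, Nat.and_one_is_mod (-b - 1).toNat]
    omega

-- what A computes for one byte, as a function of the byte (used only in the proofs)
def pvF (i : Int) : Int × Int × Int :=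
  (min (0x21 * (i % 2) + 0x47 * (i / 2 % 2) + 0x97 * (i / 4 % 2)) 255,
   min (0x21 * (i / 8 % 2) + 0x47 * (i / 16 % 2) + 0x97 * (i / 32 % 2)) 255,
   min (0x51 * (i / 64 % 2) + 0xAE * (i / 128 % 2)) 255)

-- the DP table agrees with A's per-byte arithmetic on every index 0..255
set_option maxRecDepth 20000 in
set_option maxHeartbeats 1000000 in
theorem pv_table_ok : ∀ n ∈ List.range 256,
    PySem.List.pyGetD pvTABLE ((n : Nat) : Int) (0, 0, 0) = pvF n := by decide

theorem pv_shift (b : Int) (k : Nat) : b >>> k = b / ((2 ^ k : Nat) : Int) :=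
  Int.shiftRight_eq_div_pow b k

-- one PROM byte decodes the same way in both ports
theorem pv_elem_eq (b : Int) :
    (min (0x21 * PySem.Int.band (b >>> (0:Nat)) 1 + 0x47 * PySem.Int.band (b >>> (1:Nat)) 1
            + 0x97 * PySem.Int.band (b >>> (2:Nat)) 1) 255,
     min (0x21 * PySem.Int.band (b >>> (3:Nat)) 1 + 0x47 * PySem.Int.band (b >>> (4:Nat)) 1
            + 0x97 * PySem.Int.band (b >>> (5:Nat)) 1) 255,
     min (0x51 * PySem.Int.band (b >>> (6:Nat)) 1 + 0xAE * PySem.Int.band (b >>> (7:Nat)) 1) 255)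
    = PySem.List.pyGetD pvTABLE (PySem.Int.band b 255) (0, 0, 0) := by
  have e0 : b >>> (0:Nat) = b / 1 := by rw [pv_shift]; norm_num
  have e1 : b >>> (1:Nat) = b / 2 := by rw [pv_shift]; norm_num
  have e2 : b >>> (2:Nat) = b / 4 := by rw [pv_shift]; norm_num
  have e3 : b >>> (3:Nat) = b / 8 := by rw [pv_shift]; norm_num
  have e4 : b >>> (4:Nat) = b / 16 := by rw [pv_shift]; norm_num
  have e5 : b >>> (5:Nat) = b / 32 := by rw [pv_shift]; norm_num
  have e6 : b >>> (6:Nat) = b / 64 := by rw [pv_shift]; norm_num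
  have e7 : b >>> (7:Nat) = b / 128 := by rw [pv_shift]; norm_num
  rw [e0, e1, e2, e3, e4, e5, e6, e7, pv_band255]
  simp only [pv_band1]
  set r := b % 256 with hr
  have h0 : 0 ≤ r := Int.emod_nonneg b (by norm_num)
  have h1 : r < 256 := Int.emod_lt_of_pos b (by norm_num)
  have hm : r = ((r.toNat : Nat) : Int) := by omega
  have hmem : r.toNat ∈ List.range 256 := by
    rw [List.mem_range]; omega
  have htab := pv_table_ok r.toNat hmem
  rw [hm, htab]
  unfold pvF
  have c1 : b / 1 % 2 = ((r.toNat : Nat) : Int) % 2 := by omega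
  have c2 : b / 2 % 2 = ((r.toNat : Nat) : Int) / 2 % 2 := by omega
  have c3 : b / 4 % 2 = ((r.toNat : Nat) : Int) / 4 % 2 := by omega
  have c4 : b / 8 % 2 = ((r.toNat : Nat) : Int) / 8 % 2 := by omega
  have c5 : b / 16 % 2 = ((r.toNat : Nat) : Int) / 16 % 2 := by omega
  have c6 : b / 32 % 2 = ((r.toNat : Nat) : Int) / 32 % 2 := by omega
  have c7 : b / 64 % 2 = ((r.toNat : Nat) : Int) / 64 % 2 := by omega
  have c8 : b / 128 % 2 = ((r.toNat : Nat) : Int) / 128 % 2 := by omega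
  rw [c1, c2, c3, c4, c5, c6, c7, c8]

-- the append-fold of A is the map of B
theorem pv_fold_map (prom : List Int) (acc : List (Int × Int × Int)) :
    prom.foldl (fun (pal : List (Int × Int × Int)) (b : Int) =>
      pal ++ [(min (0x21 * PySem.Int.band (b >>> (0:Nat)) 1 + 0x47 * PySem.Int.band (b >>> (1:Nat)) 1
                     + 0x97 * PySem.Int.band (b >>> (2:Nat)) 1) 255,
               min (0x21 * PySem.Int.band (b >>> (3:Nat)) 1 + 0x47 * PySem.Int.band (b >>> (4:Nat)) 1
                     + 0x97 * PySem.Int.band (b >>> (5:Nat)) 1) 255,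
               min (0x51 * PySem.Int.band (b >>> (6:Nat)) 1 + 0xAE * PySem.Int.band (b >>> (7:Nat)) 1) 255)]) acc
    = acc ++ prom.map (fun b => PySem.List.pyGetD pvTABLE (PySem.Int.band b 255) (0, 0, 0)) := by
  induction prom generalizing acc with
  | nil => simp
  | cons b rest ih =>
    rw [List.foldl_cons, ih, pv_elem_eq]
    simp

-- ===== VERDICT =====
theorem decode_master_palette_spec : Claim_equal_decode_master_palette := by
  intro prom _
  show decode_master_palette prom = decode_master_palette_alt prom
  unfold decode_master_palette decode_master_palette_alt
  simpa using pv_fold_map prom []
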